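-- pv_equiv track=rewrite | github.com/trevtoff27/ra_tracker | v3.py | tjc_sjc_28
-- ===== SOURCE A (Python) =====
-- from typing import Any, Dict, List, Optional, Tuple
--
-- JOINTS_28 = [
--     ("L_shoulder", "Left shoulder"),
--     ("R_shoulder", "Right shoulder"),
--     ("L_elbow", "Left elbow"),
--     ("R_elbow", "Right elbow"),
--     ("L_wrist", "Left wrist"),
--     ("R_wrist", "Right wrist"),
--     ("L_mcp1", "Left MCP1"),
--     ("L_mcp2", "Left MCP2"),
--     ("L_mcp3", "Left MCP3"),
--     ("L_mcp4", "Left MCP4"),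
--     ("L_mcp5", "Left MCP5"),
--     ("R_mcp1", "Right MCP1"),
--     ("R_mcp2", "Right MCP2"),
--     ("R_mcp3", "Right MCP3"),
--     ("R_mcp4", "Right MCP4"),
--     ("R_mcp5", "Right MCP5"),
--     ("L_pip1", "Left PIP1 / thumb IP"),
--     ("L_pip2", "Left PIP2"),
--     ("L_pip3", "Left PIP3"),
--     ("L_pip4", "Left PIP4"),
--     ("L_pip5", "Left PIP5"),
--     ("R_pip1", "Right PIP1 / thumb IP"),
--     ("R_pip2", "Right PIP2"),
--     ("R_pip3", "Right PIP3"),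
--     ("R_pip4", "Right PIP4"),
--     ("R_pip5", "Right PIP5"),
--     ("L_knee", "Left knee"),
--     ("R_knee", "Right knee"),
-- ]
--
-- def tjc_sjc_28(joint_map: Dict[str, Dict[str, bool]]) -> Tuple[int, int]:
--     tjc = 0
--     sjc = 0
--     for key, _label in JOINTS_28:
--         val = joint_map.get(key, {}) or {}
--         if val.get("tender"):
--             tjc += 1
--         if val.get("swollen"):
--             sjc += 1
--     return tjc, sjc
-- ===== SOURCE B (Python) =====
-- from typing import Any, Dict, List, Optional, Tuple
--
-- JOINTS_28 = [
--     ("L_shoulder", "Left shoulder"),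
--     ("R_shoulder", "Right shoulder"),
--     ("L_elbow", "Left elbow"),
--     ("R_elbow", "Right elbow"),
--     ("L_wrist", "Left wrist"),
--     ("R_wrist", "Right wrist"),
--     ("L_mcp1", "Left MCP1"),
--     ("L_mcp2", "Left MCP2"),
--     ("L_mcp3", "Left MCP3"),
--     ("L_mcp4", "Left MCP4"),
--     ("L_mcp5", "Left MCP5"),
--     ("R_mcp1", "Right MCP1"),
--     ("R_mcp2", "Right MCP2"),
--     ("R_mcp3", "Right MCP3"),
--     ("R_mcp4", "Right MCP4"),
--     ("R_mcp5", "Right MCP5"),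
--     ("L_pip1", "Left PIP1 / thumb IP"),
--     ("L_pip2", "Left PIP2"),
--     ("L_pip3", "Left PIP3"),
--     ("L_pip4", "Left PIP4"),
--     ("L_pip5", "Left PIP5"),
--     ("R_pip1", "Right PIP1 / thumb IP"),
--     ("R_pip2", "Right PIP2"),
--     ("R_pip3", "Right PIP3"),
--     ("R_pip4", "Right PIP4"),
--     ("R_pip5", "Right PIP5"),
--     ("L_knee", "Left knee"),
--     ("R_knee", "Right knee"),
-- ]
--
-- VALID = frozenset(k for k, _ in JOINTS_28)
--
-- def tjc_sjc_28(joint_map: Dict[str, Dict[str, bool]]) -> Tuple[int, int]: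
--     vals = [v or {} for k, v in joint_map.items() if k in VALID]
--     tjc = sum(1 for val in vals if val.get("tender"))
--     sjc = sum(1 for val in vals if val.get("swollen"))
--     return tjc, sjc
-- ===== Notes on version B (the rewrite author's own statement) =====
-- stated objective: idiomatic
-- what changed: B is driven by the input dict, not the fixed 28-key list: it first filters/normalizes the dict's own entries through a frozenset of valid joint keys and then counts tender and swollen in two declarative count passes, instead of A's single imperative loop over JOINTS_28 with one dict lookup and two accumulator updates per key; Pre_ only excludes association lists with duplicate keys, which a real Python dict can never contain.
import Mathlib
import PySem

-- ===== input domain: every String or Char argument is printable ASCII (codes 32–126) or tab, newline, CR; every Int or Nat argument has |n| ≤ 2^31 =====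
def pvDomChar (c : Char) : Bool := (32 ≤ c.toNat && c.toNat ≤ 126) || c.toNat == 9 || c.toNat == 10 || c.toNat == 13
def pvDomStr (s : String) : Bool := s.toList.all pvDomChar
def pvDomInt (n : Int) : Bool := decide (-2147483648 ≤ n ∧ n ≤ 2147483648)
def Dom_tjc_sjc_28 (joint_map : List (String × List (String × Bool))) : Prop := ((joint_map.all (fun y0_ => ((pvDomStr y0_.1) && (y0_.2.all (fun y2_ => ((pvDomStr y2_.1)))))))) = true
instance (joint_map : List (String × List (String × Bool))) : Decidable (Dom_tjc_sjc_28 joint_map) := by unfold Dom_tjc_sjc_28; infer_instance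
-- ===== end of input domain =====

-- B filters and normalizes the input dict's own entries through a set of valid joint keys and
-- then counts tender and swollen in two separate count passes, instead of A's single imperative
-- loop over the fixed 28-key list with one dict lookup per key (idiomatic).


-- ===== PORT A =====
def JOINTS_28 : List (String × String) := [
  ("L_shoulder", "Left shoulder"),
  ("R_shoulder", "Right shoulder"),
  ("L_elbow", "Left elbow"),
  ("R_elbow", "Right elbow"),
  ("L_wrist", "Left wrist"),
  ("R_wrist", "Right wrist"),
  ("L_mcp1", "Left MCP1"),
  ("L_mcp2", "Left MCP2"),
  ("L_mcp3", "Left MCP3"),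
  ("L_mcp4", "Left MCP4"),
  ("L_mcp5", "Left MCP5"),
  ("R_mcp1", "Right MCP1"),
  ("R_mcp2", "Right MCP2"),
  ("R_mcp3", "Right MCP3"),
  ("R_mcp4", "Right MCP4"),
  ("R_mcp5", "Right MCP5"),
  ("L_pip1", "Left PIP1 / thumb IP"),
  ("L_pip2", "Left PIP2"),
  ("L_pip3", "Left PIP3"),
  ("L_pip4", "Left PIP4"),
  ("L_pip5", "Left PIP5"),
  ("R_pip1", "Right PIP1 / thumb IP"),
  ("R_pip2", "Right PIP2"),
  ("R_pip3", "Right PIP3"),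
  ("R_pip4", "Right PIP4"),
  ("R_pip5", "Right PIP5"),
  ("L_knee", "Left knee"),
  ("R_knee", "Right knee")]

-- one iteration of A's `for key, _label in JOINTS_28` loop body
def stepA (joint_map : List (String × List (String × Bool))) (acc : Int × Int)
    (kv : String × String) : Int × Int :=
  -- val = joint_map.get(key, {}) or {}
  let val0 := (PySem.Dict.mk joint_map).getD kv.1 []
  let val := if val0.isEmpty then [] else val0
  let tjc := if ((PySem.Dict.mk val).get? "tender").getD false then acc.1 + 1 else acc.1
  let sjc := if ((PySem.Dict.mk val).get? "swollen").getD false then acc.2 + 1 else acc.2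
  (tjc, sjc)

def tjc_sjc_28 (joint_map : List (String × List (String × Bool))) : Int × Int :=
  JOINTS_28.foldl (stepA joint_map) (0, 0)

-- ===== PORT B =====
def VALID : PySem.Set String := PySem.Set.ofList (JOINTS_28.map Prod.fst)

-- truthiness of val.get("tender") / val.get("swollen") on a dict of bools
def tender? (val : List (String × Bool)) : Bool := ((PySem.Dict.mk val).get? "tender").getD false
def swollen? (val : List (String × Bool)) : Bool := ((PySem.Dict.mk val).get? "swollen").getD false

def tjc_sjc_28_alt (joint_map : List (String × List (String × Bool))) : Int × Int :=
  -- vals = [v or {} for k, v in joint_map.items() if k in VALID]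
  let vals := (joint_map.filter (fun kv => VALID.contains kv.1)).map
      (fun kv => if kv.2.isEmpty then [] else kv.2)
  -- tjc = sum(1 for val in vals if val.get("tender")); sjc likewise
  ((vals.countP tender? : Nat), (vals.countP swollen? : Nat))

-- ===== PRECONDITION & SPEC =====
-- Pre_ excludes association lists with duplicate keys: a real Python dict can never contain
-- them (no Python input reaches this case), and on such lists A reads only the first binding
-- of a key while B visits every entry.
def Pre_tjc_sjc_28 (joint_map : List (String × List (String × Bool))) : Prop :=
  (joint_map.map Prod.fst).Nodup
instance (joint_map : List (String × List (String × Bool))) : Decidable (Pre_tjc_sjc_28 joint_map) := by unfold Pre_tjc_sjc_28; infer_instance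

def pvWitness_tjc_sjc_28 : (List (String × List (String × Bool))) :=
  [("L_knee", [("tender", true)]), ("R_wrist", [("swollen", true)]), ("other", [])]

def Spec_tjc_sjc_28 (joint_map : List (String × List (String × Bool))) (out : Int × Int) : Prop := out = tjc_sjc_28_alt joint_map
instance (joint_map : List (String × List (String × Bool))) (out : Int × Int) : Decidable (Spec_tjc_sjc_28 joint_map out) := by unfold Spec_tjc_sjc_28; infer_instance

-- ===== CLAIM (what is proved, stated in full; the proofs are below) =====
def Claim_equal_tjc_sjc_28 : Prop := ∀ (joint_map : List (String × List (String × Bool))), Dom_tjc_sjc_28 joint_map → Pre_tjc_sjc_28 joint_map → Spec_tjc_sjc_28 joint_map (tjc_sjc_28 joint_map)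

-- ===== LEMMAS AND PROOFS =====

-- the bool A tests for key k
def tk (jm : List (String × List (String × Bool))) (k : String) : Bool := tender? ((PySem.Dict.mk jm).getD k [])
def sk (jm : List (String × List (String × Bool))) (k : String) : Bool := swollen? ((PySem.Dict.mk jm).getD k [])

theorem if_isEmpty_eq {α : Type} (l : List α) : (if l.isEmpty then ([] : List α) else l) = l := by
  cases l <;> simp

theorem stepA_eq (jm : List (String × List (String × Bool))) (acc : Int × Int)
    (kv : String × String) :
    stepA jm acc kv
      = (if tk jm kv.1 then acc.1 + 1 else acc.1, if sk jm kv.1 then acc.2 + 1 else acc.2) := by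
  unfold stepA tk sk tender? swollen?
  simp only [if_isEmpty_eq]

theorem foldlA_char (jm : List (String × List (String × Bool)))
    (L : List (String × String)) (a b : Int) :
    L.foldl (stepA jm) (a, b)
    = (a + (L.countP (fun kv => tk jm kv.1) : Int), b + (L.countP (fun kv => sk jm kv.1) : Int)) := by
  induction L generalizing a b with
  | nil => simp
  | cons hd tl ih =>
    rw [List.foldl_cons, stepA_eq, ih]
    simp only [List.countP_cons, Prod.mk.injEq]
    constructor <;> split_ifs <;> push_cast <;> omega

theorem altB_char (jm : List (String × List (String × Bool)))
    (p : List (String × Bool) → Bool) :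
    ((jm.filter (fun kv => VALID.contains kv.1)).map
        (fun kv => if kv.2.isEmpty then [] else kv.2)).countP p
      = jm.countP (fun kv => VALID.contains kv.1 && p kv.2) := by
  rw [List.countP_map, List.countP_filter]
  apply List.countP_congr
  intro kv _
  cases h : kv.2 <;> simp [Function.comp, h, Bool.and_comm]

theorem countP_or_disjoint {α : Type} (l : List α) (p q : α → Bool)
    (h : ∀ x ∈ l, ¬(p x = true ∧ q x = true)) :
    l.countP (fun x => p x || q x) = l.countP p + l.countP q := by
  induction l with
  | nil => simp
  | cons hd tl ih =>
    simp only [List.countP_cons]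
    rw [ih (fun x hx => h x (List.mem_cons_of_mem _ hx))]
    have := h hd (List.mem_cons_self ..)
    cases hp : p hd <;> cases hq : q hd <;> simp_all <;> omega

theorem countP_key_zero (jm : List (String × List (String × Bool))) (k : String)
    (p : List (String × Bool) → Bool) (h : k ∉ jm.map Prod.fst) :
    jm.countP (fun kv => kv.1 == k && p kv.2) = 0 := by
  rw [List.countP_eq_zero]
  intro kv hkv
  simp only [Bool.and_eq_true, beq_iff_eq]
  rintro ⟨rfl, -⟩
  exact h (List.mem_map_of_mem hkv)

theorem countP_single_key (jm : List (String × List (String × Bool))) (k : String)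
    (p : List (String × Bool) → Bool) (hp : p [] = false) (hnd : (jm.map Prod.fst).Nodup) :
    jm.countP (fun kv => kv.1 == k && p kv.2)
      = if p ((PySem.Dict.mk jm).getD k []) then 1 else 0 := by
  induction jm with
  | nil =>
    simp [PySem.Dict.getD, PySem.Dict.get?, hp]
  | cons hd tl ih =>
    rw [List.map_cons, List.nodup_cons] at hnd
    simp only [List.countP_cons]
    rw [PySem.Dict.getD_eq_get?_getD, PySem.Dict.get?_mk_cons]
    by_cases hk : hd.1 = k
    · simp only [hk, beq_self_eq_true, Bool.true_and, if_true]
      rw [countP_key_zero tl k p (hk ▸ hnd.1)]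
      cases hpv : p hd.2 <;> simp [hpv]
    · have hne : (hd.1 == k) = false := beq_false_of_ne hk
      rw [ih hnd.2, PySem.Dict.getD_eq_get?_getD]
      simp [hne]

theorem bridge (jm : List (String × List (String × Bool)))
    (L : List (String × String)) (p : List (String × Bool) → Bool) (hp : p [] = false)
    (hjm : (jm.map Prod.fst).Nodup) (hL : (L.map Prod.fst).Nodup) :
    L.countP (fun kv => p ((PySem.Dict.mk jm).getD kv.1 []))
      = jm.countP (fun kv => decide (kv.1 ∈ L.map Prod.fst) && p kv.2) := by
  induction L with
  | nil => simp
  | cons hd tl ih =>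
    rw [List.map_cons, List.nodup_cons] at hL
    have hcongr : jm.countP (fun kv => decide (kv.1 ∈ (hd :: tl).map Prod.fst) && p kv.2)
        = jm.countP (fun kv => (kv.1 == hd.1 && p kv.2) || (decide (kv.1 ∈ tl.map Prod.fst) && p kv.2)) := by
      apply List.countP_congr
      intro kv _
      by_cases h1 : kv.1 = hd.1 <;> by_cases h2 : kv.1 ∈ tl.map Prod.fst <;>
        simp [h1, h2]
    rw [hcongr, countP_or_disjoint, List.countP_cons, countP_single_key jm hd.1 p hp hjm, ih hL.2]
    · omega
    · intro kv _
      simp only [Bool.and_eq_true, beq_iff_eq, decide_eq_true_eq]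
      rintro ⟨⟨h1, -⟩, hmem, -⟩
      exact hL.1 (h1 ▸ hmem)

theorem valid_contains (k : String) :
    VALID.contains k = decide (k ∈ JOINTS_28.map Prod.fst) := by
  by_cases h : k ∈ JOINTS_28.map Prod.fst
  · simp only [h, decide_true]
    exact (PySem.Set.contains_iff _ _).mpr ((PySem.Set.mem_ofList _ _).mpr h)
  · simp only [h, decide_false]
    rcases hc : PySem.Set.contains VALID k with _ | _
    · rfl
    · exact absurd ((PySem.Set.mem_ofList _ _).mp ((PySem.Set.contains_iff _ _).mp hc)) h

-- ===== VERDICT (by name: the statement is the Claim_ definition above) =====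
theorem tjc_sjc_28_spec : Claim_equal_tjc_sjc_28 := by
  intro jm _ hpre
  unfold Spec_tjc_sjc_28 tjc_sjc_28 tjc_sjc_28_alt
  have hJ : (JOINTS_28.map Prod.fst).Nodup := by decide
  rw [foldlA_char]
  simp only [altB_char]
  have ht := bridge jm JOINTS_28 tender? rfl hpre hJ
  have hs := bridge jm JOINTS_28 swollen? rfl hpre hJ
  have hct : (jm.countP (fun kv => VALID.contains kv.1 && tender? kv.2))
      = jm.countP (fun kv => decide (kv.1 ∈ JOINTS_28.map Prod.fst) && tender? kv.2) := by
    apply List.countP_congr; intro kv _; rw [valid_contains]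
  have hcs : (jm.countP (fun kv => VALID.contains kv.1 && swollen? kv.2))
      = jm.countP (fun kv => decide (kv.1 ∈ JOINTS_28.map Prod.fst) && swollen? kv.2) := by
    apply List.countP_congr; intro kv _; rw [valid_contains]
  rw [hct, hcs, ← ht, ← hs]
  simp [tk, sk]
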